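-- pv_equiv track=rewrite | github.com/Bhumbra/Pyclamp | pyclamp/dsp/strfunc.py | str2ind
-- ===== SOURCE A (Python) =====
-- def str2ind(_S):
--   S = _S.lower()
--   m = 1
--   M = 0
--   for i in range(len(S)-1, -1, -1):
--     I = ord(S[i]) -96
--     M += I*m
--     m *= 26
--   return M - 1
-- ===== SOURCE B (Python) =====
-- def str2ind(_S):
--   M = 0
--   for ch in _S.lower():
--     M = M * 26 + (ord(ch) - 96)
--   return M - 1
-- ===== Notes on version B (the rewrite author's own statement) =====
-- stated objective: idiomatic
-- what changed: Replaces the right-to-left loop that maintains an explicit power-of-26 place-value multiplier with a forward Horner pass (M = M*26 + digit) that keeps no multiplier at all.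
import Mathlib
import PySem

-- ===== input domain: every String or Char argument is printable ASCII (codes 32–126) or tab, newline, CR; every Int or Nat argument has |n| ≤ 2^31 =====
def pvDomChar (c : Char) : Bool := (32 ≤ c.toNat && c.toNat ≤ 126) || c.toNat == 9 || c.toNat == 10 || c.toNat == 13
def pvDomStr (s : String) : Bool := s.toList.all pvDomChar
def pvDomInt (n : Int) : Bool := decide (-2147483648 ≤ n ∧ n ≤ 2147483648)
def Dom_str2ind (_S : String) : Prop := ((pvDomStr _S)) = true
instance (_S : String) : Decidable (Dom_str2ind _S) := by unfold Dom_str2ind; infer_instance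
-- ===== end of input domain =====

-- ===== PORT A =====
-- Literal port of A: lowercase, then loop i = len-1 … 0 with state (m, M), M += (ord(S[i])-96)*m, m *= 26.
def str2ind (_S : String) : Int :=
  let S : List Char := (PySem.Str.lower _S).toList
  let st : Int × Int :=
    (PySem.List.pyRange ((S.length : Int) - 1) (-1) (-1)).foldl
      (fun (st : Int × Int) i =>
        let I : Int := (PySem.List.pyGetD S i ' ').toNat - 96
        (st.1 * 26, st.2 + I * st.1)) (1, 0)
  st.2 - 1

-- ===== PORT B =====
-- Port of B: forward Horner pass over the lowercased characters, no place-value multiplier.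
def str2ind_alt (_S : String) : Int :=
  ((PySem.Str.lower _S).toList.foldl
    (fun (M : Int) (ch : Char) => M * 26 + ((ch.toNat : Int) - 96)) 0) - 1

-- ===== PRECONDITION & SPEC =====
def Spec_str2ind (_S : String) (out : Int) : Prop := out = str2ind_alt _S
instance (_S : String) (out : Int) : Decidable (Spec_str2ind _S out) := by unfold Spec_str2ind; infer_instance

-- ===== CLAIM (what is proved, stated in full; the proofs are below) =====
def Claim_equal_str2ind : Prop := ∀ (_S : String), Dom_str2ind _S → Spec_str2ind _S (str2ind _S)

-- ===== LEMMAS AND PROOFS =====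



-- B's Horner value of a character list (names the fold B runs; used only in proofs).
def hornerVal (l : List Char) : Int :=
  l.foldl (fun (M : Int) (ch : Char) => M * 26 + ((ch.toNat : Int) - 96)) 0

-- A's countdown loop, from any state (m, M), lands on (m * 26^len, M + hornerVal l * m).
lemma countdown_loop_eq (l : List Char) : ∀ (m M : Int),
    (PySem.List.pyRange ((l.length : Int) - 1) (-1) (-1)).foldl
      (fun (st : Int × Int) i =>
        (st.1 * 26, st.2 + (((PySem.List.pyGetD l i ' ').toNat : Int) - 96) * st.1)) (m, M)
      = (m * 26 ^ l.length, M + hornerVal l * m) := by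
  induction l using List.reverseRecOn with
  | nil =>
      intro m M
      rw [PySem.List.pyRange_neg_one_eq_nil (by norm_num)]
      simp [hornerVal]
  | append_singleton t c ih =>
      intro m M
      have hlen : ((t ++ [c]).length : Int) - 1 = (t.length : Int) := by
        simp
      rw [hlen, PySem.List.pyRange_neg_one_cons (by omega)]
      simp only [List.foldl_cons]
      have hget : PySem.List.pyGetD (t ++ [c]) ((t.length : Int)) ' ' = c := by
        simp [PySem.List.pyGetD_natCast]
      rw [hget]
      have hcongr :
          (PySem.List.pyRange ((t.length : Int) - 1) (-1) (-1)).foldl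
            (fun (st : Int × Int) i =>
              (st.1 * 26, st.2 + (((PySem.List.pyGetD (t ++ [c]) i ' ').toNat : Int) - 96) * st.1))
            (m * 26, M + (((c.toNat : Int) - 96)) * m)
          = (PySem.List.pyRange ((t.length : Int) - 1) (-1) (-1)).foldl
            (fun (st : Int × Int) i =>
              (st.1 * 26, st.2 + (((PySem.List.pyGetD t i ' ').toNat : Int) - 96) * st.1))
            (m * 26, M + (((c.toNat : Int) - 96)) * m) := by
        apply PySem.List.foldl_congr_mem
        intro st i hi
        have hmem := (PySem.List.mem_pyRange_neg_one).1 hi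
        have h0 : 0 ≤ i := by omega
        have hlt : i < (t.length : Int) := by omega
        have : PySem.List.pyGetD (t ++ [c]) i ' ' = PySem.List.pyGetD t i ' ' := by
          rw [PySem.List.pyGetD_eq_getElem _ _ h0 (by simp; omega),
              PySem.List.pyGetD_eq_getElem _ _ h0 (by simpa using hlt)]
          rw [List.getElem_append_left (by omega)]
        rw [this]
      rw [hcongr, ih (m * 26) (M + (((c.toNat : Int) - 96)) * m)]
      have hH : hornerVal (t ++ [c]) = hornerVal t * 26 + ((c.toNat : Int) - 96) := by
        simp [hornerVal, List.foldl_append]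
      rw [hH]
      rw [Prod.mk.injEq]
      refine ⟨?_, by ring⟩
      simp [pow_succ]; ring

-- ===== VERDICT =====
theorem str2ind_spec : Claim_equal_str2ind := by
  intro S _
  unfold Spec_str2ind str2ind str2ind_alt
  simp only []
  rw [countdown_loop_eq ((PySem.Str.lower S).toList) 1 0]
  show 0 + hornerVal (PySem.Str.lower S).toList * 1 - 1 = _
  simp [hornerVal]
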